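-- pv_equiv track=rewrite | github.com/to-be-pass/python-coding-test | src/youngrongoh/ch_08/solution_021.py | solution
-- ===== SOURCE A (Python) =====
-- def solution(want, number, discount):
--     # 상품에 대한 수량 매핑
--     shopping_list = {}
--     for i in range(len(want)):
--         shopping_list[want[i]] = number[i]
--
--     answer = 0
--     for i in range(len(discount) - 9):
--         # 10개 씩 할인 상품 개수 테이블 만들어서 원하는 상품 모두 살 수 있는지 비교
--         discount_list = {}
--         for j in range(i, i + 10):
--             p = discount[j]
--             if p in discount_list:
--                 discount_list[p] += 1
--             else:
--                 discount_list[p] = 1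
--         if discount_list == shopping_list:
--             answer += 1
--
--     return answer
-- ===== SOURCE B (Python) =====
-- def solution(want, number, discount):
--     if len(discount) < 10:
--         return 0
--     wanted = dict(zip(want, number))
--     if any(v < 1 for v in wanted.values()) or sum(wanted.values()) != 10:
--         return 0
--     target = sorted(p for p, c in wanted.items() for _ in range(c))
--     answer = 0
--     for i in range(len(discount) - 9):
--         if sorted(discount[i:i + 10]) == target:
--             answer += 1
--     return answer
-- ===== Notes on version B (the rewrite author's own statement) =====
-- stated objective: faster
-- what changed: Instead of building a fresh hash counter per window and comparing dicts, B precomputes the sorted multiset expansion of the wanted counts once (after cheap feasibility guards: all wanted counts >= 1 and summing to 10, otherwise no window can ever match) and compares each window's sorted 10-element slice against it.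
import Mathlib
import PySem

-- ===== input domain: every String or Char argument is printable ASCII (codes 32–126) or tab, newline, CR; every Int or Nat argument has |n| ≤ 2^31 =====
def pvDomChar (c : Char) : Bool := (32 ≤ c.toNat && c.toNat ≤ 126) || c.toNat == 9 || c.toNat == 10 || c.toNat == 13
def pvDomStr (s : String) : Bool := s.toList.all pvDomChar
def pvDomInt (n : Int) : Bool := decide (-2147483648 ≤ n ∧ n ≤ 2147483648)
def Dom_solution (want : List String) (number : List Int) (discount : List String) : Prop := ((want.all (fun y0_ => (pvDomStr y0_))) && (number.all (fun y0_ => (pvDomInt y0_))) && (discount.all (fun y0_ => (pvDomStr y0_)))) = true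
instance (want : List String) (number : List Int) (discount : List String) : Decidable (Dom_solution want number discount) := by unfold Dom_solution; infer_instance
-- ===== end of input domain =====

-- One honest line: B replaces A's per-window hash-counter + dict comparison by guards plus
-- comparison of each sorted 10-slice with the sorted expansion of the wanted counts (alternative decomposition).

-- ===== PORT A =====
-- Python's `dict == dict` ignores insertion order: equal key sets and equal values per key.
def pyDictEq (d1 d2 : PySem.Dict String Int) : Bool :=
  d1.keys.all (fun k => d1.get? k == d2.get? k) && d2.keys.all (fun k => d1.get? k == d2.get? k)

def solution (want : List String) (number : List Int) (discount : List String) : Int :=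
  -- shopping_list = {}; for i in range(len(want)): shopping_list[want[i]] = number[i]
  let shopping := (PySem.List.pyRange 0 (want.length : Int) 1).foldl
    (fun d i => d.insert (PySem.List.pyGetD want i "") (PySem.List.pyGetD number i 0))
    PySem.Dict.empty
  -- for i in range(len(discount) - 9): build discount_list over j in range(i, i+10); compare
  (PySem.List.pyRange 0 ((discount.length : Int) - 9) 1).foldl
    (fun answer i =>
      let dl := (PySem.List.pyRange i (i + 10) 1).foldl
        (fun d j =>
          let p := PySem.List.pyGetD discount j ""
          if d.contains p then d.insert p (d.getD p 0 + 1) else d.insert p 1)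
        PySem.Dict.empty
      if pyDictEq dl shopping then answer + 1 else answer)
    0

-- ===== PORT B =====
def solution_alt (want : List String) (number : List Int) (discount : List String) : Int :=
  if (discount.length : Int) < 10 then 0
  else
    let wanted := (want.zip number).foldl (fun d pc => d.insert pc.1 pc.2) PySem.Dict.empty
    if wanted.values.any (fun v => decide (v < 1)) || !(wanted.values.sum == (10 : Int)) then 0
    else
      let target := PySem.List.sorted
        (wanted.items.flatMap (fun pc => List.replicate pc.2.toNat pc.1)) (fun x => x) false
      (PySem.List.pyRange 0 ((discount.length : Int) - 9) 1).foldl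
        (fun answer i =>
          if PySem.List.sorted (PySem.List.slice discount (some i) (some (i + 10))) (fun x => x) false == target
          then answer + 1 else answer)
        0

-- ===== PRECONDITION & SPEC =====
-- Pre_ excludes exactly the inputs where Python A raises IndexError: number shorter than want.
def Pre_solution (want : List String) (number : List Int) (discount : List String) : Prop :=
  want.length ≤ number.length
instance (want : List String) (number : List Int) (discount : List String) : Decidable (Pre_solution want number discount) := by unfold Pre_solution; infer_instance

def pvWitness_solution : List String × List Int × List String :=
  (["a"], [3], ["a", "a", "a", "b", "b", "b", "b", "b", "b", "b"])

def Spec_solution (want : List String) (number : List Int) (discount : List String) (out : Int) : Prop := out = solution_alt want number discount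
instance (want : List String) (number : List Int) (discount : List String) (out : Int) : Decidable (Spec_solution want number discount out) := by unfold Spec_solution; infer_instance

-- ===== CLAIM (what is proved, stated in full; the proofs are below) =====
def Claim_equal_solution : Prop := ∀ (want : List String) (number : List Int) (discount : List String), Dom_solution want number discount → Pre_solution want number discount → Spec_solution want number discount (solution want number discount)

-- ===== LEMMAS AND PROOFS =====

theorem get?_counter_eq (w : List String) (p : String) :
    (PySem.Dict.counter w).get? p = if w.count p = 0 then none else some ((w.count p : Int)) := by
  by_cases h : p ∈ w
  · have hc : (PySem.Dict.counter w).contains p = true := by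
      rw [PySem.Dict.contains_counter]; simpa using h
    have hs := PySem.Dict.contains_eq_isSome_get? (PySem.Dict.counter w) p
    rw [hc] at hs
    obtain ⟨v, hv⟩ := Option.isSome_iff_exists.mp hs.symm
    have hg := PySem.Dict.getD_counter w p
    rw [PySem.Dict.getD_eq_get?_getD, hv] at hg
    simp only [Option.getD_some] at hg
    have : w.count p ≠ 0 := Nat.pos_iff_ne_zero.mp (List.count_pos_iff.mpr h)
    rw [hv, if_neg this, hg]
  · have h0 : w.count p = 0 := by simp [List.count_eq_zero]; exact h
    rw [if_pos h0]
    rw [PySem.Dict.get?_eq_none_iff_not_mem_keys, PySem.Dict.keys_counter, PySem.Set.mem_ofList]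
    exact h

theorem pyDictEq_iff (d1 d2 : PySem.Dict String Int) :
    pyDictEq d1 d2 = true ↔ ∀ p, d1.get? p = d2.get? p := by
  unfold pyDictEq
  simp only [Bool.and_eq_true, List.all_eq_true, beq_iff_eq]
  constructor
  · rintro ⟨h1, h2⟩ p
    by_cases m1 : p ∈ d1.keys
    · exact h1 p m1
    · by_cases m2 : p ∈ d2.keys
      · exact h2 p m2
      · rw [(PySem.Dict.get?_eq_none_iff_not_mem_keys d1 p).mpr m1,
            (PySem.Dict.get?_eq_none_iff_not_mem_keys d2 p).mpr m2]
  · intro h; exact ⟨fun p _ => h p, fun p _ => h p⟩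

theorem count_flatMap_replicate (l : List (String × Int)) (hl : (l.map Prod.fst).Nodup) (p : String) :
    (l.flatMap (fun pc => List.replicate pc.2.toNat pc.1)).count p
      = ((({ items := l } : PySem.Dict String Int).get? p).map Int.toNat).getD 0 := by
  induction l with
  | nil => simp [PySem.Dict.get?]
  | cons kv rest ih =>
    obtain ⟨k, v⟩ := kv
    simp only [List.map_cons, List.nodup_cons] at hl
    rw [List.flatMap_cons, List.count_append, PySem.Dict.get?_mk_cons, ih hl.2]
    by_cases hk : k = p
    · subst hk
      have : ({ items := rest } : PySem.Dict String Int).get? k = none := by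
        rw [PySem.Dict.get?_eq_none_iff_not_mem_keys]
        intro hm
        exact hl.1 (by simpa [PySem.Dict.keys] using hm)
      simp [this]
    · simp [hk, List.count_replicate]

theorem sum_toNat_of_nonneg (l : List Int) (h : ∀ v ∈ l, 0 ≤ v) :
    ((l.map Int.toNat).sum : Int) = l.sum := by
  induction l with
  | nil => simp
  | cons x xs ih =>
    simp only [List.map_cons, List.sum_cons, List.mem_cons] at *
    rw [Nat.cast_add, ih (fun v hv => h v (Or.inr hv)), Int.toNat_of_nonneg (h x (Or.inl rfl))]

theorem shopping_eq_aux (want : List String) (number : List Int) (h : want.length ≤ number.length)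
    (e : PySem.Dict String Int) :
    (List.range want.length).foldl
      (fun d j => d.insert (want.getD j "") (number.getD j 0)) e
      = (want.zip number).foldl (fun d pc => d.insert pc.1 pc.2) e := by
  induction want generalizing number e with
  | nil => simp
  | cons a as ih =>
    cases number with
    | nil => simp at h
    | cons b bs =>
      rw [List.length_cons, List.range_succ_eq_map]
      simp only [List.foldl_cons, List.foldl_map, List.getD_cons_zero, List.getD_cons_succ,
        List.zip_cons_cons]
      exact ih bs (by simpa using h) _

theorem window_fold {α β : Type} (xs : List α) (d : α) (f : β → α → β) (k : Nat) :
    ∀ (n : Nat) (init : β), n + k ≤ xs.length →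
    (PySem.List.pyRange (n : Int) ((n : Int) + (k : Int)) 1).foldl
        (fun acc j => f acc (PySem.List.pyGetD xs j d)) init
      = ((xs.drop n).take k).foldl f init := by
  induction k with
  | zero =>
    intro n init _
    rw [PySem.List.pyRange_one_eq_nil (by simp)]
    simp
  | succ k ih =>
    intro n init h
    rw [PySem.List.pyRange_one_cons (by push_cast; omega)]
    have hlt : n < xs.length := by omega
    have hdrop : xs.drop n = xs[n] :: xs.drop (n + 1) := List.drop_eq_getElem_cons hlt
    rw [List.foldl_cons, hdrop, List.take_succ_cons, List.foldl_cons,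
        PySem.List.pyGetD_natCast, List.getD_eq_getElem xs d hlt]
    have := ih (n + 1) (f init xs[n]) (by omega)
    rw [show ((n:Int) + ((k + 1 : Nat) : Int)) = ((n+1 : Nat) : Int) + ((k:Nat) : Int) by push_cast; ring]
    exact this

theorem count_expansion (S : PySem.Dict String Int) (hnd : S.keys.Nodup) (p : String) :
    (S.items.flatMap fun pc => List.replicate pc.2.toNat pc.1).count p
      = ((S.get? p).map Int.toNat).getD 0 := by
  have hnd' : (S.items.map Prod.fst).Nodup := by
    simpa [PySem.Dict.keys] using hnd
  simpa using count_flatMap_replicate S.items hnd' p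

theorem window_match (S : PySem.Dict String Int) (hnd : S.keys.Nodup)
    (h1 : ∀ v ∈ S.values, 1 ≤ v) (w : List String) :
    pyDictEq (PySem.Dict.counter w) S = true
      ↔ w.Perm (S.items.flatMap fun pc => List.replicate pc.2.toNat pc.1) := by
  rw [pyDictEq_iff, List.perm_iff_count]
  constructor
  · intro h p
    rw [count_expansion S hnd p, ← h p, get?_counter_eq]
    by_cases h0 : w.count p = 0 <;> simp [h0]
  · intro h p
    have hc := h p
    rw [count_expansion S hnd p] at hc
    rw [get?_counter_eq]
    cases hS : S.get? p with
    | none =>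
      rw [hS] at hc; simp at hc
      simp [hc]
    | some v =>
      have hv : 1 ≤ v := by
        apply h1
        have := PySem.Dict.mem_items_of_get?_eq_some S hS
        simp only [PySem.Dict.values]
        exact List.mem_map.mpr ⟨(p, v), this, rfl⟩
      rw [hS] at hc; simp at hc
      have : w.count p ≠ 0 := by omega
      rw [if_neg this, hc]
      congr 1
      omega

theorem window_bad_value (S : PySem.Dict String Int) (hnd : S.keys.Nodup)
    (p : String) (v : Int) (hmem : (p, v) ∈ S.items) (hv : v < 1) (w : List String) :
    pyDictEq (PySem.Dict.counter w) S = false := by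
  rw [← Bool.not_eq_true, pyDictEq_iff]
  simp only [not_forall]
  refine ⟨p, ?_⟩
  rw [get?_counter_eq, PySem.Dict.get?_of_mem_items S hmem hnd]
  by_cases h0 : w.count p = 0
  · simp [h0]
  · simp only [if_neg h0]
    intro hEq
    have : ((w.count p : Int)) = v := by simpa using hEq
    omega

theorem window_bad_sum (S : PySem.Dict String Int) (hnd : S.keys.Nodup)
    (h1 : ∀ v ∈ S.values, 1 ≤ v) (hs : S.values.sum ≠ 10) (w : List String)
    (hw : w.length = 10) :
    pyDictEq (PySem.Dict.counter w) S = false := by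
  rw [← Bool.not_eq_true, window_match S hnd h1 w]
  intro hperm
  have hlen := hperm.length_eq
  rw [hw, List.length_flatMap] at hlen
  apply hs
  have hv0 : ∀ v ∈ S.values, (0:Int) ≤ v := fun v hv => le_trans (by norm_num) (h1 v hv)
  rw [← sum_toNat_of_nonneg S.values hv0]
  have hmaps : S.values.map Int.toNat = S.items.map (fun pc => pc.2.toNat) := by
    simp [PySem.Dict.values, List.map_map, Function.comp]
  rw [hmaps]
  have : (S.items.map fun pc => (List.replicate pc.2.toNat pc.1).length)
       = (S.items.map fun pc => pc.2.toNat) := by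
    simp
  rw [this] at hlen
  rw [← hlen]
  norm_num

theorem inner_counter (discount : List String) (n : Nat)
    (hle : n + 10 ≤ discount.length) :
    (PySem.List.pyRange (n : Int) ((n : Int) + 10) 1).foldl
        (fun d j =>
          let p := PySem.List.pyGetD discount j ""
          if d.contains p then d.insert p (d.getD p 0 + 1) else d.insert p 1)
        PySem.Dict.empty
      = PySem.Dict.counter ((discount.drop n).take 10) := by
  have hbody : ∀ (d : PySem.Dict String Int) (p : String),
      (if d.contains p then d.insert p (d.getD p 0 + 1) else d.insert p 1)
        = d.insert p (d.getD p 0 + 1) := by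
    intro d p
    by_cases hc : d.contains p
    · rw [if_pos hc]
    · have hc' : d.contains p = false := by simpa using hc
      rw [if_neg (by simp [hc']), PySem.Dict.getD_of_not_contains d 0 hc']
      norm_num
  rw [PySem.List.foldl_congr_mem _ _
      (fun d j => d.insert (PySem.List.pyGetD discount j "")
        (d.getD (PySem.List.pyGetD discount j "") 0 + 1)) _
      (fun acc x _ => hbody acc _)]
  rw [show ((n : Int) + 10) = ((n : Int) + ((10 : Nat) : Int)) by norm_num]
  exact (window_fold discount "" (fun (d : PySem.Dict String Int) p => d.insert p (d.getD p 0 + 1)) 10 n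
      PySem.Dict.empty hle).trans
    (PySem.Dict.foldl_insert_getD_add_one_eq_counter _)

theorem slice_window (discount : List String) (n : Nat) :
    PySem.List.slice discount (some (n : Int)) (some ((n : Int) + 10))
      = (discount.drop n).take 10 := by
  rw [show ((n : Int) + 10) = ((n : Int) + ((10 : Nat) : Int)) by norm_num]
  exact PySem.List.slice_natCast_add discount n 10

theorem solution_eq_alt (want : List String) (number : List Int) (discount : List String)
    (hpre : want.length ≤ number.length) :
    solution want number discount = solution_alt want number discount := by
  unfold solution solution_alt
  have hsh : (PySem.List.pyRange 0 (want.length : Int) 1).foldl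
      (fun d i => d.insert (PySem.List.pyGetD want i "") (PySem.List.pyGetD number i 0))
      PySem.Dict.empty
      = (want.zip number).foldl (fun d pc => d.insert pc.1 pc.2) PySem.Dict.empty := by
    rw [PySem.List.pyRange_zero_natCast, List.foldl_map]
    simp only [PySem.List.pyGetD_natCast]
    exact shopping_eq_aux want number hpre _
  rw [hsh]
  set S := (want.zip number).foldl (fun d pc => d.insert pc.1 pc.2) PySem.Dict.empty with hSdef
  have hnd : S.keys.Nodup :=
    PySem.Dict.nodup_keys_foldl_insert_key _ Prod.fst (fun _ pc => pc.2) _ PySem.Dict.nodup_keys_empty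
  by_cases hL : (discount.length : Int) < 10
  · rw [if_pos hL, PySem.List.pyRange_one_eq_nil (by omega)]
    simp
  · rw [if_neg hL]
    by_cases hany : S.values.any (fun v => decide (v < 1)) = true
    · -- some wanted count < 1: no window can match; both sides 0
      rw [if_pos (by rw [hany]; rfl)]
      rw [PySem.List.foldl_congr_mem _ _ (fun acc _ => acc) _ ?_]
      · exact List.foldl_fixed _
      · intro acc i hi
        rw [PySem.List.mem_pyRange_one] at hi
        obtain ⟨n, rfl⟩ : ∃ n : Nat, i = (n : Int) := ⟨i.toNat, (Int.toNat_of_nonneg hi.1).symm⟩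
        have hle : n + 10 ≤ discount.length := by omega
        obtain ⟨v, hvmem, hvlt⟩ := List.any_eq_true.mp hany
        obtain ⟨⟨p, v'⟩, hpv, rfl⟩ := List.mem_map.mp hvmem
        have hfalse := window_bad_value S hnd p v' hpv (by simpa using hvlt)
          ((discount.drop n).take 10)
        simp [inner_counter discount n hle, hfalse]
    · have h1 : ∀ v ∈ S.values, 1 ≤ v := by
        intro v hv
        by_contra hlt
        exact hany (List.any_eq_true.mpr ⟨v, hv, by simp; omega⟩)
      by_cases hsum : S.values.sum = 10
      · -- guards pass: compare window by window
        rw [if_neg (by simp [hany, hsum])]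
        apply PySem.List.foldl_congr_mem
        intro acc i hi
        rw [PySem.List.mem_pyRange_one] at hi
        obtain ⟨n, rfl⟩ : ∃ n : Nat, i = (n : Int) := ⟨i.toNat, (Int.toNat_of_nonneg hi.1).symm⟩
        have hle : n + 10 ≤ discount.length := by omega
        have hcond : pyDictEq (PySem.Dict.counter ((discount.drop n).take 10)) S
            = (PySem.List.sorted ((discount.drop n).take 10) (fun x => x) false
                == PySem.List.sorted (S.items.flatMap (fun pc => List.replicate pc.2.toNat pc.1)) (fun x => x) false) := by
          rw [Bool.eq_iff_iff, beq_iff_eq, PySem.List.sorted_id_eq_sorted_id_iff_perm]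
          exact window_match S hnd h1 _
        simp only [inner_counter discount n hle, slice_window discount n, hcond]
      · -- sum of wanted counts ≠ 10: no window can match; both sides 0
        rw [if_pos (by simp [hsum])]
        rw [PySem.List.foldl_congr_mem _ _ (fun acc _ => acc) _ ?_]
        · exact List.foldl_fixed _
        · intro acc i hi
          rw [PySem.List.mem_pyRange_one] at hi
          obtain ⟨n, rfl⟩ : ∃ n : Nat, i = (n : Int) := ⟨i.toNat, (Int.toNat_of_nonneg hi.1).symm⟩
          have hle : n + 10 ≤ discount.length := by omega
          have hwlen : ((discount.drop n).take 10).length = 10 := by simp; omega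
          have hfalse := window_bad_sum S hnd h1 hsum _ hwlen
          simp [inner_counter discount n hle, hfalse]


-- ===== VERDICT (by name: the statement is the Claim_ definition above) =====
theorem solution_spec : Claim_equal_solution := by
  intro want number discount _ hpre
  unfold Spec_solution
  exact solution_eq_alt want number discount hpre
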